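-- pv_equiv track=rewrite | github.com/rt-uae-dev/new-new | src/main_pipeline.py | normalize_subject
-- ===== SOURCE A (Python) =====
-- def normalize_subject(subject_name: str) -> str:
--     """
--     Normalize subject/folder names to improve matching across cycles:
--     - Lowercase
--     - Strip whitespace
--     - Remove common reply/forward prefixes (re:, fw:, fwd: repeated)
--     - Collapse multiple spaces
--     """
--     if not subject_name:
--         return ""
--     name = subject_name.strip().lower()
--     # Remove repeating prefixes like "fwd:", "fw:", "re:" at the start
--     prefixes = ("fwd:", "fw:", "re:")
--     changed = True
--     while changed:
--         changed = False
--         for p in prefixes: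
--             if name.startswith(p):
--                 name = name[len(p):].lstrip()
--                 changed = True
--     # Also handle plain words without colon at the start
--     prefixes_plain = ("fwd ", "fw ", "re ")
--     changed = True
--     while changed:
--         changed = False
--         for p in prefixes_plain:
--             if name.startswith(p):
--                 name = name[len(p):].lstrip()
--                 changed = True
--     # Collapse multiple spaces
--     name = " ".join(name.split())
--     return name
-- ===== SOURCE B (Python) =====
-- import re
--
-- _COLON_RE = re.compile(r'^(?:(?:fwd:|fw:|re:)\s*)+')
-- _PLAIN_RE = re.compile(r'^(?:(?:fwd|fw|re) \s*)+')
--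
-- def normalize_subject(subject_name: str) -> str:
--     """Regex-based normalization: lowercase, strip, drop repeated reply/forward
--     prefixes (colon form first, then plain-word form), collapse whitespace."""
--     if not subject_name:
--         return ""
--     name = subject_name.strip().lower()
--     name = _COLON_RE.sub('', name)
--     name = _PLAIN_RE.sub('', name)
--     return ' '.join(name.split())
-- ===== Notes on version B (the rewrite author's own statement) =====
-- stated objective: idiomatic
-- what changed: The two changed-flag while/for prefix-stripping loops are replaced by two precompiled anchored regex substitutions (colon-form prefixes first, then plain-word prefixes), keeping the strip/lower and whitespace-collapse steps.
import Mathlib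
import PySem

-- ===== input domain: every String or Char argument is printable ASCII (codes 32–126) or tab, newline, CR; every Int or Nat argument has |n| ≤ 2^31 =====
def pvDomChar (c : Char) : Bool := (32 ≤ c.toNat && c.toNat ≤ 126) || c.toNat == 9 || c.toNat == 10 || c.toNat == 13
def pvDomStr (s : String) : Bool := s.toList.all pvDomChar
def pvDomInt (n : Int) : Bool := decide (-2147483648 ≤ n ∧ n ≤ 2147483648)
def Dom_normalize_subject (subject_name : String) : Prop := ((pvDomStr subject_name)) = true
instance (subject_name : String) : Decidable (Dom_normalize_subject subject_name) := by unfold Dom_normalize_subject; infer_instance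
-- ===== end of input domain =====

-- B replaces A's two changed-flag while/for prefix-stripping loops by two anchored regex
-- substitutions (objective: idiomatic); equivalence of return values is proved on all inputs.

-- ===== PORT A =====
-- the colon-form and plain-form prefix tuples of A
def pvPrefixesColon : List (List Char) := ["fwd:".toList, "fw:".toList, "re:".toList]
def pvPrefixesPlain : List (List Char) := ["fwd ".toList, "fw ".toList, "re ".toList]

-- one pass of A's inner `for p in prefixes:` loop, threading (name, changed)
def pvForStep : List (List Char) → List Char → Bool → (List Char × Bool)
  | [], name, changed => (name, changed)
  | p :: ps, name, changed =>
      if PySem.Chars.startswith name p then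
        pvForStep ps (PySem.Chars.lstrip (name.drop p.length)) true
      else
        pvForStep ps name changed

-- length never grows under pvForStep (used for termination of the while loop)
theorem pvForStep_len_le : ∀ (ps : List (List Char)) (s : List Char) (c : Bool),
    (pvForStep ps s c).1.length ≤ s.length := by
  intro ps
  induction ps with
  | nil => intro s c; simp [pvForStep]
  | cons p ps ih =>
    intro s c
    by_cases h : PySem.Chars.startswith s p = true
    · simp only [pvForStep, h, if_pos]
      calc (pvForStep ps (PySem.Chars.lstrip (s.drop p.length)) true).1.length
          ≤ (PySem.Chars.lstrip (s.drop p.length)).length := ih _ _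
        _ ≤ (s.drop p.length).length := by
              simp only [PySem.Chars.lstrip]; exact List.length_dropWhile_le _ _
        _ ≤ s.length := by simp
    · simp only [pvForStep, h, if_neg, Bool.not_eq_true]
      exact ih _ _

-- if the changed flag came out true starting from false, the name strictly shrank
theorem pvForStep_len_lt : ∀ (ps : List (List Char)) (s : List Char),
    (∀ p ∈ ps, p ≠ []) → (pvForStep ps s false).2 = true →
    (pvForStep ps s false).1.length < s.length := by
  intro ps
  induction ps with
  | nil => intro s _ h; simp [pvForStep] at h
  | cons p ps ih =>
    intro s hne h
    by_cases hp : PySem.Chars.startswith s p = true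
    · simp only [pvForStep, hp, if_pos] at h ⊢
      have hpre : p <+: s := (PySem.Chars.startswith_iff s p).mp hp
      have hplen : p.length ≤ s.length := List.IsPrefix.length_le hpre
      have hppos : 0 < p.length := by
        have := hne p (by simp)
        exact List.length_pos_of_ne_nil this
      calc (pvForStep ps (PySem.Chars.lstrip (s.drop p.length)) true).1.length
          ≤ (PySem.Chars.lstrip (s.drop p.length)).length := pvForStep_len_le _ _ _
        _ ≤ (s.drop p.length).length := by
              simp only [PySem.Chars.lstrip]; exact List.length_dropWhile_le _ _
        _ < s.length := by simp; omega
    · simp only [pvForStep, hp, if_neg, Bool.not_eq_true] at h ⊢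
      exact ih s (fun q hq => hne q (by simp [hq])) h

-- A's `while changed:` loop (termination: each changed pass strictly shrinks the name)
def pvWhile (ps : List (List Char)) (hps : ∀ p ∈ ps, p ≠ []) (name : List Char) : List Char :=
  let r := pvForStep ps name false
  if h : r.2 = true then pvWhile ps hps r.1 else r.1
termination_by name.length
decreasing_by exact pvForStep_len_lt ps name hps h

def normalize_subject (subject_name : String) : String :=
  -- `if not subject_name: return ""`
  if subject_name.toList = [] then "" else
  let name := PySem.Chars.lower (PySem.Chars.strip subject_name.toList)
  let name := pvWhile pvPrefixesColon (by decide) name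
  let name := pvWhile pvPrefixesPlain (by decide) name
  String.ofList (PySem.Chars.join " ".toList (PySem.Chars.split₀ name))

-- ===== PORT B =====
-- Hand-port of re.sub of the anchored pattern ^(?:(?:fwd:|fw:|re:)\s*)+ (resp. the plain form
-- ^(?:(?:fwd|fw|re) \s*)+) with replacement '': the alternatives are pairwise disjoint literals
-- starting with a non-\s character, so the regex engine's greedy anchored match never backtracks
-- and the substitution is EXACTLY the recursion below: repeatedly drop the first matching
-- alternative and then the following run of whitespace, until no alternative matches.
def pvMatch1 (ps : List (List Char)) (s : List Char) : Option (List Char) :=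
  ps.findSome? fun p => if p.isPrefixOf s then some (s.drop p.length) else none

theorem pvMatch1_cons (p : List Char) (ps : List (List Char)) (s : List Char) :
    pvMatch1 (p :: ps) s =
      if p.isPrefixOf s then some (s.drop p.length) else pvMatch1 ps s := by
  by_cases h : p.isPrefixOf s = true <;> simp [pvMatch1, List.findSome?, h]

theorem pvMatch1_len_lt (ps : List (List Char)) (s r : List Char)
    (hps : ∀ p ∈ ps, p ≠ []) (h : pvMatch1 ps s = some r) : r.length < s.length := by
  induction ps with
  | nil => simp [pvMatch1] at h
  | cons p ps ih =>
    rw [pvMatch1_cons] at h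
    by_cases hp : p.isPrefixOf s = true
    · rw [if_pos hp] at h
      have hpre : p <+: s := List.isPrefixOf_iff_prefix.mp hp
      have hplen : p.length ≤ s.length := List.IsPrefix.length_le hpre
      have hppos : 0 < p.length := List.length_pos_of_ne_nil (hps p (by simp))
      cases h; simp; omega
    · rw [if_neg hp] at h
      exact ih (fun q hq => hps q (by simp [hq])) h

-- the regex substitution, as the recursion it denotes on these disjoint alternatives
def pvRegexStrip (ps : List (List Char)) (hps : ∀ p ∈ ps, p ≠ []) (s : List Char) : List Char :=
  match hm : pvMatch1 ps s with
  | some r => pvRegexStrip ps hps (r.dropWhile PySem.Chars.isspace)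
  | none => s
termination_by s.length
decreasing_by
  calc (r.dropWhile PySem.Chars.isspace).length
      ≤ r.length := List.length_dropWhile_le _ _
    _ < s.length := pvMatch1_len_lt ps s r hps hm

def normalize_subject_alt (subject_name : String) : String :=
  if subject_name.toList = [] then "" else
  let name := PySem.Chars.lower (PySem.Chars.strip subject_name.toList)
  let name := pvRegexStrip pvPrefixesColon (by decide) name
  let name := pvRegexStrip pvPrefixesPlain (by decide) name
  String.ofList (PySem.Chars.join " ".toList (PySem.Chars.split₀ name))

-- ===== PRECONDITION & SPEC =====
def Spec_normalize_subject (subject_name : String) (out : String) : Prop := out = normalize_subject_alt subject_name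
instance (subject_name : String) (out : String) : Decidable (Spec_normalize_subject subject_name out) := by unfold Spec_normalize_subject; infer_instance

-- ===== CLAIM (what is proved, stated in full; the proofs are below) =====
def Claim_equal_normalize_subject : Prop := ∀ (subject_name : String), Dom_normalize_subject subject_name → Spec_normalize_subject subject_name (normalize_subject subject_name)

-- ===== LEMMAS AND PROOFS =====

-- EXCLUSIVITY of each prefix tuple: if p ∈ ps matches s, p is the FIRST alternative matching s
def pvExclusive (ps : List (List Char)) : Prop :=
  ∀ p ∈ ps, ∀ s : List Char, p.isPrefixOf s = true → pvMatch1 ps s = some (s.drop p.length)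

theorem pvExclusive_colon : pvExclusive pvPrefixesColon := by
  intro p hp s hpre
  simp only [pvPrefixesColon, List.mem_cons, List.not_mem_nil, or_false] at hp
  rcases hp with h | h | h <;> subst h <;>
    (obtain ⟨t, rfl⟩ := List.isPrefixOf_iff_prefix.mp hpre) <;>
    simp [pvMatch1, List.findSome?, pvPrefixesColon]

theorem pvExclusive_plain : pvExclusive pvPrefixesPlain := by
  intro p hp s hpre
  simp only [pvPrefixesPlain, List.mem_cons, List.not_mem_nil, or_false] at hp
  rcases hp with h | h | h <;> subst h <;>
    (obtain ⟨t, rfl⟩ := List.isPrefixOf_iff_prefix.mp hpre) <;>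
    simp [pvMatch1, List.findSome?, pvPrefixesPlain]

-- one regex-unit step is invisible to pvRegexStrip
theorem pvRegexStrip_step (ps : List (List Char)) (hps : ∀ p ∈ ps, p ≠ [])
    (s r : List Char) (h : pvMatch1 ps s = some r) :
    pvRegexStrip ps hps s = pvRegexStrip ps hps (r.dropWhile PySem.Chars.isspace) := by
  conv_lhs => rw [pvRegexStrip]
  split
  · next r' hm => rw [hm] at h; cases h; rfl
  · next hm => rw [hm] at h; cases h

-- pvForStep only performs regex-unit steps, so pvRegexStrip absorbs a whole for-pass
theorem pvRegexStrip_forStep (ps : List (List Char)) (hps : ∀ p ∈ ps, p ≠ [])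
    (hex : pvExclusive ps) :
    ∀ (qs : List (List Char)), (∀ q ∈ qs, q ∈ ps) → ∀ (s : List Char) (c : Bool),
      pvRegexStrip ps hps (pvForStep qs s c).1 = pvRegexStrip ps hps s := by
  intro qs
  induction qs with
  | nil => intro _ s c; simp [pvForStep]
  | cons q qs ih =>
    intro hsub s c
    by_cases hq : PySem.Chars.startswith s q = true
    · simp only [pvForStep, hq, if_pos]
      have hqin : q ∈ ps := hsub q (by simp)
      have hpre : q.isPrefixOf s = true := by
        simpa [PySem.Chars.startswith] using hq
      have hm : pvMatch1 ps s = some (s.drop q.length) := hex q hqin s hpre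
      rw [ih (fun x hx => hsub x (by simp [hx]))]
      simp only [PySem.Chars.lstrip]
      exact (pvRegexStrip_step ps hps s (s.drop q.length) hm).symm
    · simp only [pvForStep, hq, if_neg, Bool.not_eq_true]
      exact ih (fun x hx => hsub x (by simp [hx])) s c
-- (the rewrite above uses that Chars.lstrip is dropWhile isspace, i.e. the same \s* consumption)

-- once the changed flag is true it stays true for the rest of the pass
theorem pvForStep_snd_true : ∀ (ps : List (List Char)) (s : List Char),
    (pvForStep ps s true).2 = true := by
  intro ps
  induction ps with
  | nil => intro s; simp [pvForStep]
  | cons p ps ih =>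
    intro s
    by_cases hp : PySem.Chars.startswith s p = true
    · simp only [pvForStep, hp, if_pos]; exact ih _
    · simp only [pvForStep, hp, if_neg, Bool.not_eq_true]; exact ih _

-- a for-pass that set no flag changed nothing and witnesses that no alternative matches
theorem pvForStep_unchanged : ∀ (ps : List (List Char)) (s : List Char),
    (pvForStep ps s false).2 = false →
    (pvForStep ps s false).1 = s ∧ ∀ p ∈ ps, p.isPrefixOf s = false := by
  intro ps
  induction ps with
  | nil => intro s _; simp [pvForStep]
  | cons p ps ih =>
    intro s h
    by_cases hp : PySem.Chars.startswith s p = true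
    · exfalso
      simp only [pvForStep, hp, if_pos] at h
      have := pvForStep_snd_true ps (PySem.Chars.lstrip (s.drop p.length))
      rw [h] at this; cases this
    · simp only [pvForStep, hp, if_neg, Bool.not_eq_true] at h ⊢
      obtain ⟨h1, h2⟩ := ih s h
      refine ⟨h1, ?_⟩
      intro q hq
      rcases List.mem_cons.mp hq with rfl | hq'
      · simp only [Bool.not_eq_true] at hp
        simpa [PySem.Chars.startswith] using hp
      · exact h2 q hq'

theorem pvMatch1_eq_none (ps : List (List Char)) (s : List Char)
    (h : ∀ p ∈ ps, p.isPrefixOf s = false) : pvMatch1 ps s = none := by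
  induction ps with
  | nil => rfl
  | cons p ps ih =>
    rw [pvMatch1_cons, if_neg (by simp [h p (by simp)])]
    exact ih (fun q hq => h q (by simp [hq]))

theorem pvRegexStrip_of_none (ps : List (List Char)) (hps : ∀ p ∈ ps, p ≠ [])
    (s : List Char) (h : pvMatch1 ps s = none) : pvRegexStrip ps hps s = s := by
  rw [pvRegexStrip]
  split
  · next r hm => rw [hm] at h; cases h
  · rfl

-- the while loop computes the regex substitution
theorem pvWhile_eq_regexStrip (ps : List (List Char)) (hps : ∀ p ∈ ps, p ≠ [])
    (hex : pvExclusive ps) : ∀ (n : Nat) (s : List Char), s.length ≤ n →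
    pvWhile ps hps s = pvRegexStrip ps hps s := by
  intro n
  induction n with
  | zero =>
    intro s hs
    have hnil : s = [] := List.eq_nil_of_length_eq_zero (Nat.le_zero.mp hs)
    rw [pvWhile]
    by_cases h : (pvForStep ps s false).2 = true
    · exact absurd (pvForStep_len_lt ps s hps h) (by subst hnil; simp)
    · rw [dif_neg h]
      obtain ⟨h1, h2⟩ := pvForStep_unchanged ps s (by simpa using h)
      rw [h1, pvRegexStrip_of_none ps hps s (pvMatch1_eq_none ps s h2)]
  | succ n ih =>
    intro s hs
    rw [pvWhile]
    by_cases h : (pvForStep ps s false).2 = true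
    · rw [dif_pos h]
      have hlt := pvForStep_len_lt ps s hps h
      rw [ih _ (by omega)]
      exact pvRegexStrip_forStep ps hps hex ps (fun q hq => hq) s false
    · rw [dif_neg h]
      obtain ⟨h1, h2⟩ := pvForStep_unchanged ps s (by simpa using h)
      rw [h1, pvRegexStrip_of_none ps hps s (pvMatch1_eq_none ps s h2)]

-- ===== VERDICT (by name: the statement is the Claim_ definition above) =====
theorem normalize_subject_spec : Claim_equal_normalize_subject := by
  intro s _
  unfold Spec_normalize_subject normalize_subject normalize_subject_alt
  by_cases h : s.toList = []
  · simp [h]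
  · simp only [h, if_false]
    rw [pvWhile_eq_regexStrip pvPrefixesColon (by decide) pvExclusive_colon _ _ (le_refl _),
        pvWhile_eq_regexStrip pvPrefixesPlain (by decide) pvExclusive_plain _ _ (le_refl _)]
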